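-- pv_equiv track=rewrite | github.com/dragancajic/proceduralno-programiranje | vjezbe-06/zadatak-8.py | trazeni_rezultat_za_par
-- ===== SOURCE A (Python) =====
-- def cifre_broja(n):
--     if n == 0:
--         return [0]
--     cifre = []
--     while n > 0:
--         c = n % 10
--         n //= 10
--         cifre.insert(0, c)
--     return cifre
--
-- def broj_od_cifara(lista_cifara):
--     '''Kreira novi broj koji se sastoji od cifara koje se dobijaju kao ulazni
--         parametar
--         `param lista_cifara`: cifre broja
--     '''
--     n = 0
--     for c in lista_cifara:
--         n *= 10
--         n += c
--     return n
--
-- def zamijeni_prvu_i_posljednju_cifru(n):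
--     cifre = cifre_broja(n)
--     prva = cifre[0]
--     posljednja = cifre[-1]
--     # mijenjamo prvu i posljednju cifru u listi
--     cifre[0] = posljednja
--     cifre[-1] = prva
--
--     # na jednostavniji način smo mogli zamijeniti prvu i posljednju cifru u
--     # listi: `cifre[0], cifre[-1] = cifre[-1], cifre[0]`. √
--
--     novi_broj = broj_od_cifara(cifre)
--     return novi_broj
--
-- def trazeni_rezultat_za_par(par_brojeva):
--     b1, b2 = par_brojeva
--     # proizvod brojeva
--     p1 = b1 * b2
--     cifre_b1 = cifre_broja(b1)
--     cifre_b2 = cifre_broja(b2)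
--     # p2 je proizvod cifara brojeva b1 i b2
--     p2 = 1
--     for c in cifre_b1:
--         p2 *= c
--     for c in cifre_b2:
--         p2 *= c
--     # zamijenimo prvu i posljednju cifru broja p2
--     p2 = zamijeni_prvu_i_posljednju_cifru(p2)
--     return (p1, p2)
-- ===== SOURCE B (Python) =====
-- def trazeni_rezultat_za_par(par_brojeva):
--     b1, b2 = par_brojeva
--     p1 = b1 * b2
--     # digit product computed inline, no lists
--     p2 = 1
--     for n in (b1, b2):
--         if n == 0:
--             p2 = 0
--         while n > 0:
--             p2 *= n % 10
--             n //= 10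
--     # swap first and last digit of p2 (p2 >= 0) in closed form
--     d = 1
--     t = p2
--     while t >= 10:
--         t //= 10
--         d += 1
--     hi = 10 ** (d - 1)
--     first = p2 // hi
--     last = p2 % 10
--     return (p1, p2 + (last - first) * hi + (first - last))
-- ===== Notes on version B (the rewrite author's own statement) =====
-- stated objective: simpler
-- what changed: B drops all digit-list machinery: it multiplies digits inline while peeling them with %10 and //10, and swaps the first and last digit of the product by a closed arithmetic formula (digit count d, first=p2//10**(d-1), last=p2%10, p2+(last-first)*10**(d-1)+(first-last)) instead of building, mutating and re-assembling digit lists.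
import Mathlib
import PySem

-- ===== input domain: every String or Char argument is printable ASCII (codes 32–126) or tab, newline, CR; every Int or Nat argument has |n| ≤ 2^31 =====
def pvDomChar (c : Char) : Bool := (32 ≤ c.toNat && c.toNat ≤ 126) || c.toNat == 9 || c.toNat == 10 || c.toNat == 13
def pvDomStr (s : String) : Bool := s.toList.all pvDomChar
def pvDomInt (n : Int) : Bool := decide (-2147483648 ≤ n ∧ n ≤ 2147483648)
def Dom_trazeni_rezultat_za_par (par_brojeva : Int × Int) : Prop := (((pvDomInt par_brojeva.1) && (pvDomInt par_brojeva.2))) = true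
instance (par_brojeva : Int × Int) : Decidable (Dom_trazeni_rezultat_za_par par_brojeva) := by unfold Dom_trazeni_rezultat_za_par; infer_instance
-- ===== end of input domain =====

-- B replaces A's digit-list building/mutation with inline %10-//10 digit peeling and a
-- closed arithmetic first/last-digit swap (objective: simpler; return value only, no mutation involved).

-- ===== PORT A =====
-- while n > 0: c = n % 10; n //= 10; cifre.insert(0, c)
def cifreAux (n : Int) (acc : List Int) : List Int :=
  if 0 < n then cifreAux (PySem.Int.floordiv n 10) (PySem.Int.mod n 10 :: acc) else acc
termination_by n.toNat
decreasing_by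
  rw [PySem.Int.floordiv_eq_ediv_of_pos (by norm_num)]; omega

def cifre_broja (n : Int) : List Int :=
  if n = 0 then [0] else cifreAux n []

def broj_od_cifara (lista_cifara : List Int) : Int :=
  lista_cifara.foldl (fun n c => n * 10 + c) 0

def zamijeni_prvu_i_posljednju_cifru (n : Int) : Int :=
  let cifre := cifre_broja n
  -- cifre[0] / cifre[-1]: cifre_broja never returns [] for the nonnegative n this
  -- program passes it, so the total getD/setD forms are exact here
  let prva := PySem.List.pyGetD cifre 0 0
  let posljednja := PySem.List.pyGetD cifre (-1) 0
  let cifre := PySem.List.pySetD cifre 0 posljednja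
  let cifre := PySem.List.pySetD cifre (-1) prva
  broj_od_cifara cifre

def trazeni_rezultat_za_par (par_brojeva : Int × Int) : Int × Int :=
  let b1 := par_brojeva.1
  let b2 := par_brojeva.2
  let p1 := b1 * b2
  let cifre_b1 := cifre_broja b1
  let cifre_b2 := cifre_broja b2
  let p2 := cifre_b1.foldl (fun p c => p * c) 1
  let p2 := cifre_b2.foldl (fun p c => p * c) p2
  (p1, zamijeni_prvu_i_posljednju_cifru p2)

-- ===== PORT B =====
-- while n > 0: p2 *= n % 10; n //= 10
def digProdAux (n p : Int) : Int :=
  if 0 < n then digProdAux (PySem.Int.floordiv n 10) (p * PySem.Int.mod n 10) else p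
termination_by n.toNat
decreasing_by
  rw [PySem.Int.floordiv_eq_ediv_of_pos (by norm_num)]; omega

-- while t >= 10: t //= 10; d += 1
def countAux (t : Int) (d : Nat) : Nat :=
  if 10 ≤ t then countAux (PySem.Int.floordiv t 10) (d + 1) else d
termination_by t.toNat
decreasing_by
  rw [PySem.Int.floordiv_eq_ediv_of_pos (by norm_num)]; omega

def trazeni_rezultat_za_par_alt (par_brojeva : Int × Int) : Int × Int :=
  let b1 := par_brojeva.1
  let b2 := par_brojeva.2
  let p1 := b1 * b2
  let p2 := digProdAux b1 (if b1 = 0 then 0 else 1)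
  let p2 := digProdAux b2 (if b2 = 0 then 0 else p2)
  let d := countAux p2 1
  let hi := (10 : Int) ^ (d - 1)
  let first := PySem.Int.floordiv p2 hi
  let last := PySem.Int.mod p2 10
  (p1, p2 + (last - first) * hi + (first - last))

-- ===== PRECONDITION & SPEC =====
def Spec_trazeni_rezultat_za_par (par_brojeva : Int × Int) (out : Int × Int) : Prop := out = trazeni_rezultat_za_par_alt par_brojeva
instance (par_brojeva : Int × Int) (out : Int × Int) : Decidable (Spec_trazeni_rezultat_za_par par_brojeva out) := by unfold Spec_trazeni_rezultat_za_par; infer_instance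

-- ===== CLAIM (what is proved, stated in full; the proofs are below) =====
def Claim_equal_trazeni_rezultat_za_par : Prop := ∀ (par_brojeva : Int × Int), Dom_trazeni_rezultat_za_par par_brojeva → Spec_trazeni_rezultat_za_par par_brojeva (trazeni_rezultat_za_par par_brojeva)

-- ===== LEMMAS AND PROOFS =====

theorem fd10 (n : Int) : PySem.Int.floordiv n 10 = n / 10 :=
  PySem.Int.floordiv_eq_ediv_of_pos (by norm_num)

theorem md10 (n : Int) : PySem.Int.mod n 10 = n % 10 :=
  PySem.Int.mod_eq_emod_of_pos (by norm_num)

theorem cifreAux_neg (n : Int) (acc : List Int) (h : ¬ 0 < n) : cifreAux n acc = acc := by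
  rw [cifreAux]; simp [h]

theorem digProdAux_neg (n p : Int) (h : ¬ 0 < n) : digProdAux n p = p := by
  rw [digProdAux]; simp [h]

-- accumulator lemma for A's digit list
theorem cifreAux_acc (n : Int) (acc : List Int) :
    cifreAux n acc = cifreAux n [] ++ acc := by
  induction hk : n.toNat using Nat.strong_induction_on generalizing n acc with
  | _ k ih =>
    by_cases h : 0 < n
    · have h1 : cifreAux n acc = cifreAux (n / 10) (n % 10 :: acc) := by
        rw [cifreAux]; simp [h, fd10, md10]
      have h2 : cifreAux n [] = cifreAux (n / 10) (n % 10 :: ([] : List Int)) := by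
        rw [cifreAux]; simp [h, fd10, md10]
      rw [h1, h2, ih (n / 10).toNat (by omega) _ _ rfl,
        ih (n / 10).toNat (by omega) _ (n % 10 :: ([] : List Int)) rfl]
      simp
    · rw [cifreAux_neg n acc h, cifreAux_neg n [] h]; simp

theorem cifreAux_pos (n : Int) (h : 0 < n) :
    cifreAux n [] = cifreAux (n / 10) [] ++ [n % 10] := by
  conv_lhs => rw [cifreAux]
  simp only [h, if_pos, fd10, md10]
  exact cifreAux_acc _ _

theorem cifreAux_ne_nil (n : Int) (h : 0 < n) : cifreAux n [] ≠ [] := by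
  rw [cifreAux_pos n h]; simp

-- digProdAux pulls its accumulator out multiplicatively
theorem digProdAux_factor (n a p : Int) :
    digProdAux n (a * p) = a * digProdAux n p := by
  induction hk : n.toNat using Nat.strong_induction_on generalizing n p with
  | _ k ih =>
    by_cases h : 0 < n
    · have h1 : digProdAux n (a * p) = digProdAux (n / 10) (a * p * (n % 10)) := by
        rw [digProdAux]; simp [h, fd10, md10]
      have h2 : digProdAux n p = digProdAux (n / 10) (p * (n % 10)) := by
        rw [digProdAux]; simp [h, fd10, md10]
      rw [h1, h2, mul_assoc, ih (n / 10).toNat (by omega) _ _ rfl]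
    · rw [digProdAux_neg n (a * p) h, digProdAux_neg n p h]

-- A's digit-product fold equals B's inline peeling loop
theorem foldl_mul_cifre (n p : Int) :
    (cifreAux n []).foldl (fun q c => q * c) p = digProdAux n p := by
  induction hk : n.toNat using Nat.strong_induction_on generalizing n p with
  | _ k ih =>
    by_cases h : 0 < n
    · have h2 : digProdAux n p = digProdAux (n / 10) (p * (n % 10)) := by
        rw [digProdAux]; simp [h, fd10, md10]
      rw [cifreAux_pos n h, List.foldl_append]
      simp only [List.foldl_cons, List.foldl_nil]
      rw [ih (n / 10).toNat (by omega) _ p rfl, h2]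
      have e1 : digProdAux (n / 10) p = p * digProdAux (n / 10) 1 := by
        simpa using digProdAux_factor (n / 10) p 1
      have e2 : digProdAux (n / 10) (p * (n % 10)) = p * (n % 10) * digProdAux (n / 10) 1 := by
        simpa using digProdAux_factor (n / 10) (p * (n % 10)) 1
      rw [e1, e2]; ring
    · rw [cifreAux_neg n [] h, digProdAux_neg n p h]
      simp

theorem digProdAux_nonneg (n p : Int) (hp : 0 ≤ p) : 0 ≤ digProdAux n p := by
  induction hk : n.toNat using Nat.strong_induction_on generalizing n p with
  | _ k ih =>
    by_cases h : 0 < n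
    · have h1 : digProdAux n p = digProdAux (n / 10) (p * (n % 10)) := by
        rw [digProdAux]; simp [h, fd10, md10]
      rw [h1]
      exact ih (n / 10).toNat (by omega) _ _
        (mul_nonneg hp (Int.emod_nonneg n (by norm_num))) rfl
    · rw [digProdAux_neg n p h]; exact hp

-- countAux counts exactly the digits of a positive number
theorem countAux_eq_len (n : Int) (h : 0 < n) (d : Nat) :
    countAux n d = (cifreAux n []).length - 1 + d := by
  induction hk : n.toNat using Nat.strong_induction_on generalizing n d with
  | _ k ih =>
    by_cases h10 : 10 ≤ n
    · have h1 : countAux n d = countAux (n / 10) (d + 1) := by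
        rw [countAux]; simp [h10, fd10]
      have hlen : (cifreAux n []).length = (cifreAux (n / 10) []).length + 1 := by
        rw [cifreAux_pos n h]; simp
      have hne : cifreAux (n / 10) [] ≠ [] := cifreAux_ne_nil _ (by omega)
      have hlp : 1 ≤ (cifreAux (n / 10) []).length := List.length_pos_iff.mpr hne
      rw [h1, ih (n / 10).toNat (by omega) _ (by omega) (d + 1) rfl, hlen]
      omega
    · have h1 : countAux n d = d := by rw [countAux]; simp [h10]
      have h0 : n / 10 = 0 := by omega
      have hlen : cifreAux n [] = [n % 10] := by
        rw [cifreAux_pos n h, h0, cifreAux_neg 0 [] (by norm_num)]; simp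
      rw [h1, hlen]; simp

-- broj_od_cifara with a generalized accumulator
theorem brojF_acc (l : List Int) (a : Int) :
    l.foldl (fun n c => n * 10 + c) a = a * 10 ^ l.length + l.foldl (fun n c => n * 10 + c) 0 := by
  induction l generalizing a with
  | nil => simp
  | cons c t ih =>
    simp only [List.foldl_cons, List.length_cons]
    rw [ih (a * 10 + c), ih (0 * 10 + c), pow_succ]
    ring

theorem brojF_set (l : List Int) (i : Nat) (x : Int) (h : i < l.length) :
    (l.set i x).foldl (fun n c => n * 10 + c) 0
      = l.foldl (fun n c => n * 10 + c) 0 + (x - l.getD i 0) * 10 ^ (l.length - 1 - i) := by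
  induction l generalizing i with
  | nil => simp at h
  | cons c t ih =>
    cases i with
    | zero =>
      simp only [List.set_cons_zero, List.foldl_cons, List.length_cons, List.getD_cons_zero]
      rw [brojF_acc t (0 * 10 + x), brojF_acc t (0 * 10 + c)]
      simp only [Nat.add_sub_cancel, Nat.sub_zero]
      ring
    | succ i =>
      have hi : i < t.length := by simpa using h
      simp only [List.set_cons_succ, List.foldl_cons, List.length_cons, List.getD_cons_succ]
      rw [brojF_acc (t.set i x) (0 * 10 + c), brojF_acc t (0 * 10 + c), List.length_set, ih i hi]
      have e : t.length + 1 - 1 - (i + 1) = t.length - 1 - i := by omega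
      rw [e]
      ring

theorem brojF_cifre (n : Int) (h : 0 ≤ n) :
    (cifreAux n []).foldl (fun m c => m * 10 + c) 0 = n := by
  induction hk : n.toNat using Nat.strong_induction_on generalizing n with
  | _ k ih =>
    by_cases hp : 0 < n
    · rw [cifreAux_pos n hp, List.foldl_append,
        ih (n / 10).toNat (by omega) _ (by omega) rfl]
      simp only [List.foldl_cons, List.foldl_nil]
      omega
    · have h0 : n = 0 := by omega
      subst h0
      rw [cifreAux_neg 0 [] (by norm_num)]; simp

theorem cifre_head (n : Int) (h : 0 < n) :
    (cifreAux n []).getD 0 0 = n / 10 ^ ((cifreAux n []).length - 1) := by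
  induction hk : n.toNat using Nat.strong_induction_on generalizing n with
  | _ k ih =>
    by_cases h10 : 10 ≤ n
    · have hq : 0 < n / 10 := by omega
      have hne : cifreAux (n / 10) [] ≠ [] := cifreAux_ne_nil _ hq
      have hlp : 1 ≤ (cifreAux (n / 10) []).length := List.length_pos_iff.mpr hne
      have hhead : (cifreAux n []).getD 0 0 = (cifreAux (n / 10) []).getD 0 0 := by
        rw [cifreAux_pos n h]
        cases hL : cifreAux (n / 10) [] with
        | nil => exact absurd hL hne
        | cons a t => simp
      have hlen : (cifreAux n []).length = (cifreAux (n / 10) []).length + 1 := by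
        rw [cifreAux_pos n h]; simp
      rw [hhead, ih (n / 10).toNat (by omega) _ hq rfl, hlen]
      have hsplit : (10 : Int) ^ ((cifreAux (n / 10) []).length + 1 - 1)
          = 10 * 10 ^ ((cifreAux (n / 10) []).length - 1) := by
        have e : (cifreAux (n / 10) []).length + 1 - 1 = ((cifreAux (n / 10) []).length - 1) + 1 := by omega
        rw [e, pow_succ]; ring
      rw [hsplit]
      first
        | exact Int.ediv_ediv_of_nonneg (by norm_num)
        | exact Int.ediv_ediv_of_nonneg n (by norm_num)
        | exact Int.ediv_ediv_eq_ediv_mul (by norm_num)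
    · have h0 : n / 10 = 0 := by omega
      have hlist : cifreAux n [] = [n % 10] := by
        rw [cifreAux_pos n h, h0, cifreAux_neg 0 [] (by norm_num)]; simp
      rw [hlist]
      simp only [List.getD_cons_zero, List.length_cons, List.length_nil]
      omega

-- pySetD with index -1 on a list ending in a singleton replaces the last element
theorem pySetD_append_neg_one (l : List Int) (c v : Int) :
    PySem.List.pySetD (l ++ [c]) (-1) v = l ++ [v] := by
  simp [PySem.List.pySetD, PySem.List.pySet?, PySem.List.pyIdx?]

theorem set_append_len (X : List Int) (c v : Int) : (X ++ [c]).set X.length v = X ++ [v] := by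
  induction X with
  | nil => simp
  | cons a t ih => simp [ih]

theorem getD_append_len (X : List Int) (c : Int) : (X ++ [c]).getD X.length 0 = c := by
  induction X with
  | nil => simp
  | cons a t ih => simpa using ih

-- the swap agrees with B's closed formula on nonnegative input
theorem swap_eq (m : Int) (hm : 0 ≤ m) :
    zamijeni_prvu_i_posljednju_cifru m =
      m + (PySem.Int.mod m 10 - PySem.Int.floordiv m ((10 : Int) ^ (countAux m 1 - 1)))
            * (10 : Int) ^ (countAux m 1 - 1)
        + (PySem.Int.floordiv m ((10 : Int) ^ (countAux m 1 - 1)) - PySem.Int.mod m 10) := by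
  by_cases h0 : m = 0
  · subst h0
    have hc : countAux 0 1 = 1 := by rw [countAux]; norm_num
    have hz : zamijeni_prvu_i_posljednju_cifru 0 = 0 := by
      simp [zamijeni_prvu_i_posljednju_cifru, cifre_broja, broj_od_cifara,
        PySem.List.pyGetD, PySem.List.pyGet?, PySem.List.pyIdx?,
        PySem.List.pySetD, PySem.List.pySet?]
    rw [hz, hc]
    norm_num [PySem.Int.mod, PySem.Int.floordiv]
  · have hp : 0 < m := by omega
    have hL := cifreAux_pos m hp
    set L' : List Int := cifreAux (m / 10) [] with hL'
    set d : Nat := (cifreAux m []).length with hd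
    have hdlen : d = L'.length + 1 := by rw [hd, hL]; simp
    -- the three digit facts
    have hcount : countAux m 1 = d := by
      rw [countAux_eq_len m hp 1]
      have : 1 ≤ d := by omega
      omega
    have hhead : (cifreAux m []).getD 0 0 = m / 10 ^ (d - 1) := cifre_head m hp
    -- unfold A's swap
    rw [zamijeni_prvu_i_posljednju_cifru]
    simp only [cifre_broja, if_neg h0]
    rw [hcount]
    -- identify prva / posljednja
    have hprva : PySem.List.pyGetD (cifreAux m []) 0 0 = m / 10 ^ (d - 1) := by
      rw [PySem.List.pyGetD_zero]; exact hhead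
    have hposl : PySem.List.pyGetD (cifreAux m []) (-1) 0 = m % 10 := by
      rw [hL]; exact PySem.List.pyGetD_neg_one_append_singleton L' (m % 10) 0
    rw [hprva, hposl]
    -- the two assignments
    have hset : PySem.List.pySetD
          (PySem.List.pySetD (cifreAux m []) 0 (m % 10)) (-1) (m / 10 ^ (d - 1))
        = ((cifreAux m []).set 0 (m % 10)).set (d - 1) (m / 10 ^ (d - 1)) := by
      have h1 : PySem.List.pySetD (cifreAux m []) 0 (m % 10) = (cifreAux m []).set 0 (m % 10) := by
        have := PySem.List.pySetD_natCast (xs := cifreAux m []) (n := 0) (v := m % 10)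
        simpa using this
      rw [h1]
      cases hLp : L' with
      | nil =>
        have hone : cifreAux m [] = [m % 10] := by rw [hL, hLp]; simp
        have hd1 : d = 1 := by rw [hLp] at hdlen; simpa using hdlen
        rw [hone, hd1]
        simp only [List.set_cons_zero]
        have := pySetD_append_neg_one [] (m % 10) (m / 10 ^ (1 - 1))
        simpa using this
      | cons a t =>
        have hsplit : (cifreAux m []).set 0 (m % 10) = ((a :: t).set 0 (m % 10)) ++ [m % 10] := by
          rw [hL, hLp]; simp
        have hlen2 : ((a :: t).set 0 (m % 10)).length = d - 1 := by
          simp [hdlen, hLp]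
        rw [hsplit, pySetD_append_neg_one, ← hlen2, set_append_len]
    rw [hset]
    -- arithmetic via brojF lemmas
    have hlen0 : ((cifreAux m []).set 0 (m % 10)).length = d := by simp [hd]
    have hdpos : 0 < d := by omega
    have hgd : ((cifreAux m []).set 0 (m % 10)).getD (d - 1) 0 = m % 10 := by
      cases hLp : L' with
      | nil =>
        have hone : cifreAux m [] = [m % 10] := by rw [hL, hLp]; simp
        have hd1 : d = 1 := by rw [hdlen, hLp]; simp
        rw [hone, hd1]; simp
      | cons a t =>
        have hsplit : (cifreAux m []).set 0 (m % 10) = ((a :: t).set 0 (m % 10)) ++ [m % 10] := by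
          rw [hL, hLp]; simp
        have hlen2 : ((a :: t).set 0 (m % 10)).length = d - 1 := by simp [hdlen, hLp]
        rw [hsplit, ← hlen2, getD_append_len]
    rw [broj_od_cifara,
      brojF_set _ (d - 1) _ (by omega : d - 1 < ((cifreAux m []).set 0 (m % 10)).length ),
      hgd, hlen0,
      brojF_set _ 0 _ (by omega : 0 < (cifreAux m []).length),
      brojF_cifre m hm, hhead]
    have hfd : PySem.Int.floordiv m ((10 : Int) ^ (d - 1)) = m / 10 ^ (d - 1) :=
      PySem.Int.floordiv_eq_ediv_of_pos (by positivity)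
    rw [md10, hfd, hd]
    have e : (cifreAux m []).length - 1 - ((cifreAux m []).length - 1) = 0 := by omega
    rw [e]
    simp only [Nat.sub_zero, pow_zero]
    ring

theorem stage (b p : Int) :
    (cifre_broja b).foldl (fun q c => q * c) p = digProdAux b (if b = 0 then 0 else p) := by
  by_cases hb : b = 0
  · subst hb
    have h1 : digProdAux 0 0 = 0 := digProdAux_neg 0 0 (by norm_num)
    simp [cifre_broja, h1]
  · simp only [cifre_broja, if_neg hb]
    exact foldl_mul_cifre b p

-- ===== VERDICT (by name: the statement is the Claim_ definition above) =====
theorem trazeni_rezultat_za_par_spec : Claim_equal_trazeni_rezultat_za_par := by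
  intro par _dom
  unfold Spec_trazeni_rezultat_za_par trazeni_rezultat_za_par trazeni_rezultat_za_par_alt
  simp only
  have hnn : 0 ≤ digProdAux par.2 (if par.2 = 0 then 0 else digProdAux par.1 (if par.1 = 0 then 0 else 1)) := by
    apply digProdAux_nonneg
    split
    · norm_num
    · exact digProdAux_nonneg _ _ (by split <;> norm_num)
  rw [stage par.1 1, stage par.2 (digProdAux par.1 (if par.1 = 0 then 0 else 1)),
    swap_eq _ hnn]
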